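-- pv_equiv track=rewrite | github.com/smnk-1/OmGTU | Olimpiadki/razvedka.py | razv
-- ===== SOURCE A (Python) =====
-- import math
--
-- def razv(n):
--     if n == 3:
--         return 1
--     elif n < 3:
--         return 0
--     elif n > 3:
--         fp = math.floor(n/2)
--         sp = math.floor(n/2) + (n % 2)
--         return razv(fp) + razv(sp)
-- ===== SOURCE B (Python) =====
-- def razv(n):
--     # Closed-form tent: after k full levels of splitting, the 2**k nodes are
--     # floor(n/2**k) (p-r of them) and ceil(n/2**k) (r of them); count the 3-leaves.
--     if n == 3:
--         return 1
--     if n < 3: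
--         return 0
--     m, k = n, 0
--     while m >= 4:
--         m //= 2
--         k += 1
--     p = 1 << k
--     r = n % p
--     return p - r if m == 3 else r
-- ===== Notes on version B (the rewrite author's own statement) =====
-- stated objective: faster
-- what changed: Replaced the O(n) binary recursion (razv(floor)+razv(ceil)) by a closed-form O(log n) computation: halve n until it drops below 4 (k steps), then the 2^k nodes at that level are floor(n/2^k) and ceil(n/2^k) with multiplicities 2^k - n%2^k and n%2^k, so the count of 3-leaves is read off directly from k and n%2^k.
import Mathlib
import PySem

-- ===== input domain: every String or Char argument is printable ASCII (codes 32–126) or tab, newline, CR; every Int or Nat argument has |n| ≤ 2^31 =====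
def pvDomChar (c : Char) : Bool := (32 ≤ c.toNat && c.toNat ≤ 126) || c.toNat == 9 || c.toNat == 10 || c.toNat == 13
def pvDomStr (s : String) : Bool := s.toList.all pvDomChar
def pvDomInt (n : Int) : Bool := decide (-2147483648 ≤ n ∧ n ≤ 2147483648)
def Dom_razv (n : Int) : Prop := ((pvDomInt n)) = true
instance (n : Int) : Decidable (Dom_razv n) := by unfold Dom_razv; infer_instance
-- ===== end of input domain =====

-- B replaces A's O(n) binary recursion by an O(log n) closed-form count over the halving levels.

-- ===== PORT A =====
def razv (n : Int) : Int :=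
  if n = 3 then 1
  else if n < 3 then 0
  else  -- Python's `elif n > 3`: for an int this is the only remaining case
    -- math.floor(n/2) is exact for |n| ≤ 2^31, equals floor division
    let fp := PySem.Int.floordiv n 2
    let sp := PySem.Int.floordiv n 2 + PySem.Int.mod n 2
    razv fp + razv sp
termination_by n.toNat
decreasing_by
  all_goals
    simp only [PySem.Int.floordiv_eq_ediv_of_pos (a := n) (by norm_num : (0:Int) < 2),
      PySem.Int.mod_eq_emod_of_pos (a := n) (by norm_num : (0:Int) < 2)]
  all_goals omega

-- ===== PORT B =====
-- while m >= 4: m //= 2; k += 1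
def razvLoop (m : Int) (k : Nat) : Int × Nat :=
  if 4 ≤ m then razvLoop (PySem.Int.floordiv m 2) (k + 1) else (m, k)
termination_by m.toNat
decreasing_by
  simp only [PySem.Int.floordiv_eq_ediv_of_pos (a := m) (by norm_num : (0:Int) < 2)]; omega

def razv_alt (n : Int) : Int :=
  if n = 3 then 1
  else if n < 3 then 0
  else
    let mk := razvLoop n 0
    let p : Int := 2 ^ mk.2          -- 1 << k
    let r := PySem.Int.mod n p
    if mk.1 = 3 then p - r else r

-- ===== PRECONDITION & SPEC =====
def Spec_razv (n : Int) (out : Int) : Prop := out = razv_alt n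
instance (n : Int) (out : Int) : Decidable (Spec_razv n out) := by unfold Spec_razv; infer_instance

-- ===== CLAIM (what is proved, stated in full; the proofs are below) =====
def Claim_equal_razv : Prop := ∀ (n : Int), Dom_razv n → Spec_razv n (razv n)

-- ===== LEMMAS AND PROOFS =====

-- the tent function: the common value of both programs on 2^(k+1) ≤ n < 2^(k+2)
def tent (k : Nat) (n : Int) : Int := min (n - 2 ^ (k + 1)) (2 ^ (k + 2) - n)

theorem loop_spec : ∀ (k : Nat) (n : Int) (j : Nat),
    2 ^ (k + 1) ≤ n → n < 2 ^ (k + 2) → razvLoop n j = (n / 2 ^ k, k + j) := by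
  intro k
  induction k with
  | zero =>
    intro n j h1 h2
    norm_num at h1 h2
    rw [razvLoop, if_neg (by omega)]
    norm_num
  | succ k ih =>
    intro n j h1 h2
    have hp : (1:Int) ≤ 2 ^ k := one_le_pow₀ (by norm_num)
    have e0 : (2:Int) ^ (k + 1) = 2 * 2 ^ k := by ring
    have e1 : (2:Int) ^ (k + 1 + 1) = 4 * 2 ^ k := by ring
    have e2 : (2:Int) ^ (k + 1 + 2) = 8 * 2 ^ k := by ring
    have e3 : (2:Int) ^ (k + 2) = 4 * 2 ^ k := by ring
    rw [razvLoop, if_pos (by omega),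
      PySem.Int.floordiv_eq_ediv_of_pos (by norm_num : (0:Int) < 2),
      ih (n / 2) (j + 1) (by omega) (by omega),
      Int.ediv_ediv_of_nonneg (by norm_num : (0:Int) ≤ 2)]
    rw [Prod.mk.injEq]
    exact ⟨by rw [e0], by omega⟩

theorem alt_tent : ∀ (k : Nat) (n : Int),
    2 ^ (k + 1) ≤ n → n < 2 ^ (k + 2) → razv_alt n = tent k n := by
  intro k
  cases k with
  | zero =>
    intro n h1 h2
    norm_num at h1 h2
    interval_cases n
    · rw [razv_alt, if_neg (by norm_num), if_pos (by norm_num)]; decide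
    · rw [razv_alt, if_pos rfl]; decide
  | succ k =>
    intro n h1 h2
    have hp : (1:Int) ≤ 2 ^ (k + 1) := one_le_pow₀ (by norm_num)
    have e1 : (2:Int) ^ (k + 1 + 1) = 2 * 2 ^ (k + 1) := by ring
    have e2 : (2:Int) ^ (k + 1 + 2) = 4 * 2 ^ (k + 1) := by ring
    have hq := Int.mul_ediv_add_emod n (2 ^ (k + 1))
    have hr0 : 0 ≤ n % 2 ^ (k + 1) := Int.emod_nonneg n (by positivity)
    have hr1 : n % 2 ^ (k + 1) < 2 ^ (k + 1) := Int.emod_lt_of_pos n (by positivity)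
    rw [razv_alt, if_neg (by omega), if_neg (by omega)]
    simp only [loop_spec (k + 1) n 0 h1 h2, Nat.add_zero,
      PySem.Int.mod_eq_emod_of_pos (by positivity : (0:Int) < 2 ^ (k + 1))]
    by_cases h3 : 3 * 2 ^ (k + 1) ≤ n
    · have hd : n / 2 ^ (k + 1) = 3 := by
        rw [← PySem.Int.floordiv_eq_ediv_of_pos (by positivity : (0:Int) < 2 ^ (k + 1)),
          PySem.Int.floordiv_eq_iff_of_pos (by positivity)]
        constructor <;> omega
      rw [hd] at hq
      rw [if_pos hd]
      simp only [tent, min_def]; split_ifs <;> omega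
    · have hd : n / 2 ^ (k + 1) = 2 := by
        rw [← PySem.Int.floordiv_eq_ediv_of_pos (by positivity : (0:Int) < 2 ^ (k + 1)),
          PySem.Int.floordiv_eq_iff_of_pos (by positivity)]
        constructor <;> omega
      rw [hd] at hq
      rw [if_neg (by rw [hd]; norm_num)]
      simp only [tent, min_def]; split_ifs <;> omega

theorem razv_pow (m : Nat) : razv (2 ^ (m + 1)) = 0 := by
  induction m with
  | zero => rw [razv]; norm_num
  | succ m ih =>
    have hp : (1:Int) ≤ 2 ^ (m + 1) := one_le_pow₀ (by norm_num)
    have e : (2:Int) ^ (m + 1 + 1) = 2 * 2 ^ (m + 1) := by ring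
    rw [razv, if_neg (by omega), if_neg (by omega)]
    simp only [PySem.Int.floordiv_eq_ediv_of_pos (by norm_num : (0:Int) < 2),
      PySem.Int.mod_eq_emod_of_pos (by norm_num : (0:Int) < 2)]
    have hf : (2:Int) ^ (m + 1 + 1) / 2 = 2 ^ (m + 1) := by omega
    have hm : (2:Int) ^ (m + 1 + 1) % 2 = 0 := by omega
    rw [hf, hm, add_zero, ih]
    norm_num

theorem razv_tent : ∀ (k : Nat) (n : Int),
    2 ^ (k + 1) ≤ n → n < 2 ^ (k + 2) → razv n = tent k n := by
  intro k
  induction k with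
  | zero =>
    intro n h1 h2
    norm_num at h1 h2
    interval_cases n
    · rw [razv, if_neg (by norm_num), if_pos (by norm_num)]; decide
    · rw [razv, if_pos rfl]; decide
  | succ k ih =>
    intro n h1 h2
    have hp : (1:Int) ≤ 2 ^ k := one_le_pow₀ (by norm_num)
    have e0 : (2:Int) ^ (k + 1) = 2 * 2 ^ k := by ring
    have e1 : (2:Int) ^ (k + 1 + 1) = 4 * 2 ^ k := by ring
    have e2 : (2:Int) ^ (k + 1 + 2) = 8 * 2 ^ k := by ring
    have e3 : (2:Int) ^ (k + 2) = 4 * 2 ^ k := by ring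
    rw [razv, if_neg (by omega), if_neg (by omega)]
    simp only [PySem.Int.floordiv_eq_ediv_of_pos (by norm_num : (0:Int) < 2),
      PySem.Int.mod_eq_emod_of_pos (by norm_num : (0:Int) < 2)]
    by_cases hs : n / 2 + n % 2 < 2 ^ (k + 2)
    · rw [ih (n / 2) (by omega) (by omega), ih (n / 2 + n % 2) (by omega) hs]
      simp only [tent, min_def]; split_ifs <;> omega
    · -- the ceiling half hits the boundary 2^(k+2): n = 2^(k+3) - 1
      have hceil : n / 2 + n % 2 = 2 ^ (k + 2) := by omega
      rw [hceil, ih (n / 2) (by omega) (by omega),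
        (by ring : (2:Int) ^ (k + 2) = 2 ^ (k + 1 + 1)), razv_pow]
      simp only [tent, min_def]; split_ifs <;> omega

theorem exists_level : ∀ (N : Nat) (n : Int), 2 ≤ n → n.toNat ≤ N →
    ∃ k : Nat, 2 ^ (k + 1) ≤ n ∧ n < 2 ^ (k + 2) := by
  intro N
  induction N using Nat.strong_induction_on with
  | _ N ih =>
    intro n h2 hN
    by_cases h4 : n < 4
    · exact ⟨0, by norm_num; omega⟩
    · obtain ⟨k, hk1, hk2⟩ := ih (N - 1) (by omega) (n / 2) (by omega) (by omega)
      have a1 : (2:Int) ^ (k + 1 + 1) = 2 * 2 ^ (k + 1) := by ring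
      have a2 : (2:Int) ^ (k + 1 + 2) = 2 * 2 ^ (k + 2) := by ring
      exact ⟨k + 1, by omega, by omega⟩

theorem razv_eq_alt (n : Int) : razv n = razv_alt n := by
  by_cases h2 : n < 2
  · have h3 : ¬ n = 3 := by omega
    have hl : n < 3 := by omega
    rw [razv, razv_alt, if_neg h3, if_neg h3, if_pos hl, if_pos hl]
  · obtain ⟨k, hk1, hk2⟩ := exists_level n.toNat n (by omega) (le_refl _)
    rw [razv_tent k n hk1 hk2, alt_tent k n hk1 hk2]

-- ===== VERDICT (by name: the statement is the Claim_ definition above) =====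
theorem razv_spec : Claim_equal_razv := by
  intro n _
  exact razv_eq_alt n
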